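-- pv_equiv track=rewrite | github.com/irfan-sec/InvestiGUI | logs/windows.py | analyze_logon_events
-- ===== SOURCE A (Python) =====
-- def analyze_logon_events(events):
--     """Analyze logon-related events for patterns."""
--     logon_events = [e for e in events if e.get('event_id') in [4624, 4625, 4634, 4648]]
--
--     analysis = {
--         'total_logons': len([e for e in logon_events if e.get('event_id') == 4624]),
--         'failed_logons': len([e for e in logon_events if e.get('event_id') == 4625]),
--         'logoffs': len([e for e in logon_events if e.get('event_id') == 4634]),
--         'explicit_logons': len([e for e in logon_events if e.get('event_id') == 4648])
--     }
--
--     return analysis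
-- ===== SOURCE B (Python) =====
-- def analyze_logon_events(events):
--     """Analyze logon-related events for patterns."""
--     analysis = {'total_logons': 0, 'failed_logons': 0,
--                 'logoffs': 0, 'explicit_logons': 0}
--     for e in events:
--         event_id = e.get('event_id')
--         if event_id == 4624:
--             analysis['total_logons'] += 1
--         elif event_id == 4625:
--             analysis['failed_logons'] += 1
--         elif event_id == 4634:
--             analysis['logoffs'] += 1
--         elif event_id == 4648:
--             analysis['explicit_logons'] += 1
--     return analysis
-- ===== Notes on version B (the rewrite author's own statement) =====
-- stated objective: simpler
-- what changed: Replaces the filter pass plus four counting comprehensions (five scans of the data) with one accumulation loop that classifies each event's id and increments the matching counter.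
import Mathlib
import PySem

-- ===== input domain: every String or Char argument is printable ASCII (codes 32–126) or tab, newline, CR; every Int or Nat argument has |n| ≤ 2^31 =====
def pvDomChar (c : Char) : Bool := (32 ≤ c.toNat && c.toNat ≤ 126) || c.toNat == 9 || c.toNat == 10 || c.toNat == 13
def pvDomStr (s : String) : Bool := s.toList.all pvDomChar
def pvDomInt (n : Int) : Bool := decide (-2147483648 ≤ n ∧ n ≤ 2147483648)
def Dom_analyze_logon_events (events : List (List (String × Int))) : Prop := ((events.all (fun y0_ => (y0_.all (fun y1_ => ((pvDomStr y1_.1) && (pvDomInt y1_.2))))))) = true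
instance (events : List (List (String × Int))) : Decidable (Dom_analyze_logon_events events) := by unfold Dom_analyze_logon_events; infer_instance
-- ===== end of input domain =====

-- B replaces A's filter pass plus four counting comprehensions with one accumulation loop (simpler, single pass).


-- ===== PORT A =====
-- e.get('event_id') : first-match lookup in the dict (assoc list)
def pvGetId (e : List (String × Int)) : Option Int := (PySem.Dict.mk e).get? "event_id"

def analyze_logon_events (events : List (List (String × Int))) : List (String × Int) :=
  let logon_events := events.filter (fun e => decide (pvGetId e ∈ [some (4624:Int), some 4625, some 4634, some 4648]))
  [ ("total_logons", ((logon_events.filter (fun e => pvGetId e == some 4624)).length : Int)),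
    ("failed_logons", ((logon_events.filter (fun e => pvGetId e == some 4625)).length : Int)),
    ("logoffs", ((logon_events.filter (fun e => pvGetId e == some 4634)).length : Int)),
    ("explicit_logons", ((logon_events.filter (fun e => pvGetId e == some 4648)).length : Int)) ]

-- ===== PORT B =====
-- one pass: classify each event's id and bump the matching counter
def pvStep (c : Int × Int × Int × Int) (e : List (String × Int)) : Int × Int × Int × Int :=
  let event_id := pvGetId e
  if event_id == some 4624 then (c.1 + 1, c.2.1, c.2.2.1, c.2.2.2)
  else if event_id == some 4625 then (c.1, c.2.1 + 1, c.2.2.1, c.2.2.2)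
  else if event_id == some 4634 then (c.1, c.2.1, c.2.2.1 + 1, c.2.2.2)
  else if event_id == some 4648 then (c.1, c.2.1, c.2.2.1, c.2.2.2 + 1)
  else c

def analyze_logon_events_alt (events : List (List (String × Int))) : List (String × Int) :=
  let c := events.foldl pvStep (0, 0, 0, 0)
  [ ("total_logons", c.1), ("failed_logons", c.2.1),
    ("logoffs", c.2.2.1), ("explicit_logons", c.2.2.2) ]

-- ===== PRECONDITION & SPEC =====
def Spec_analyze_logon_events (events : List (List (String × Int))) (out : List (String × Int)) : Prop := out = analyze_logon_events_alt events
instance (events : List (List (String × Int))) (out : List (String × Int)) : Decidable (Spec_analyze_logon_events events out) := by unfold Spec_analyze_logon_events; infer_instance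

-- ===== CLAIM (what is proved, stated in full; the proofs are below) =====
def Claim_equal_analyze_logon_events : Prop := ∀ (events : List (List (String × Int))), Dom_analyze_logon_events events → Spec_analyze_logon_events events (analyze_logon_events events)

-- ===== LEMMAS AND PROOFS =====

-- number of events whose id equals v
def pvCnt (events : List (List (String × Int))) (v : Int) : Int :=
  (events.countP (fun e => pvGetId e == some v) : Int)

-- A's per-category count collapses to a plain count over all events
theorem pvA_count (events : List (List (String × Int))) (v : Int)
    (hv : v = 4624 ∨ v = 4625 ∨ v = 4634 ∨ v = 4648) :
    (((events.filter (fun e => decide (pvGetId e ∈ [some (4624:Int), some 4625, some 4634, some 4648]))).filter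
        (fun e => pvGetId e == some v)).length : Int) = pvCnt events v := by
  unfold pvCnt
  congr 1
  rw [← List.countP_eq_length_filter, List.countP_filter]
  apply List.countP_congr
  intro e _
  by_cases h : pvGetId e = some v
  · simp only [h]
    rcases hv with rfl | rfl | rfl | rfl <;> simp
  · simp [h]

-- B's fold invariant
theorem pvB_fold (events : List (List (String × Int))) :
    ∀ a b c d : Int, events.foldl pvStep (a, b, c, d) =
      (a + pvCnt events 4624, b + pvCnt events 4625, c + pvCnt events 4634, d + pvCnt events 4648) := by
  induction events with
  | nil => intro a b c d; simp [pvCnt]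
  | cons e l ih =>
    intro a b c d
    simp only [List.foldl_cons]
    have hcnt : ∀ v : Int, pvCnt (e :: l) v =
        (if pvGetId e == some v then 1 else 0) + pvCnt l v := by
      intro v
      unfold pvCnt
      rw [List.countP_cons]
      by_cases h : pvGetId e = some v <;> simp [h] <;> omega
    by_cases h1 : pvGetId e == some 4624
    · have h1' : pvGetId e = some 4624 := by simpa using h1
      rw [show pvStep (a, b, c, d) e = (a + 1, b, c, d) from by simp [pvStep, h1], ih]
      simp [hcnt, h1', Prod.ext_iff] ; omega
    · by_cases h2 : pvGetId e == some 4625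
      · have h2' : pvGetId e = some 4625 := by simpa using h2
        rw [show pvStep (a, b, c, d) e = (a, b + 1, c, d) from by simp [pvStep, h1, h2], ih]
        simp [hcnt, h2', Prod.ext_iff] ; omega
      · by_cases h3 : pvGetId e == some 4634
        · have h3' : pvGetId e = some 4634 := by simpa using h3
          rw [show pvStep (a, b, c, d) e = (a, b, c + 1, d) from by simp [pvStep, h1, h2, h3], ih]
          simp [hcnt, h3', Prod.ext_iff] ; omega
        · by_cases h4 : pvGetId e == some 4648
          · have h4' : pvGetId e = some 4648 := by simpa using h4
            rw [show pvStep (a, b, c, d) e = (a, b, c, d + 1) from by simp [pvStep, h1, h2, h3, h4], ih]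
            simp [hcnt, h4', Prod.ext_iff] ; omega
          · rw [show pvStep (a, b, c, d) e = (a, b, c, d) from by simp [pvStep, h1, h2, h3, h4], ih]
            have hskip : ∀ v : Int, (pvGetId e == some v) = false → pvCnt (e :: l) v = pvCnt l v := by
              intro v hv; rw [hcnt v, hv]; simp
            rw [hskip _ (by simpa using h1), hskip _ (by simpa using h2),
                hskip _ (by simpa using h3), hskip _ (by simpa using h4)]

-- ===== VERDICT (by name: the statement is the Claim_ definition above) =====
theorem analyze_logon_events_spec : Claim_equal_analyze_logon_events := by
  intro events _
  show _ = _
  unfold analyze_logon_events analyze_logon_events_alt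
  rw [pvB_fold events 0 0 0 0]
  simp only [zero_add]
  rw [pvA_count events 4624 (by tauto), pvA_count events 4625 (by tauto),
      pvA_count events 4634 (by tauto), pvA_count events 4648 (by tauto)]
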